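-- pv_equiv track=rewrite | github.com/yeongkyo1997/Algorithm | 프로그래머스/unrated/181926. 수 조작하기 1/수 조작하기 1.py | solution
-- ===== SOURCE A (Python) =====
-- def solution(n, control):
--     result = n
--
--     for i in control:
--         if i == 'w':
--             result += 1
--         if i == 's':
--             result -= 1
--         if i == 'd':
--             result += 10
--         if i == 'a':
--             result -= 10
--
--     return result
-- ===== SOURCE B (Python) =====
-- def solution(n, control):
--     return (n
--             + control.count('w') - control.count('s')
--             + 10 * (control.count('d') - control.count('a')))
-- ===== Notes on version B (the rewrite author's own statement) =====
-- stated objective: simpler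
-- what changed: Replaces the per-character accumulation loop with four if-branches by a closed-form arithmetic expression over str.count tallies of the four command characters.
import Mathlib
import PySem

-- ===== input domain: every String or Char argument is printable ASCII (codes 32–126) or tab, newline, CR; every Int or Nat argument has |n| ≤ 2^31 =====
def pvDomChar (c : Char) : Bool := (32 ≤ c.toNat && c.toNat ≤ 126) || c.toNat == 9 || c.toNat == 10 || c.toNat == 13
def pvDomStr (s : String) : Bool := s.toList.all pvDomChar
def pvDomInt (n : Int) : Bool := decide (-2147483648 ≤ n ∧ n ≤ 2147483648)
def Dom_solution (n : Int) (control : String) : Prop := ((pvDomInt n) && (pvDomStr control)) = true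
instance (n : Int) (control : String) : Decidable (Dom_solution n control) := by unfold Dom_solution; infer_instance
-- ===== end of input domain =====

-- B replaces A's accumulation loop (four if-branches per character) by a closed-form
-- arithmetic expression over str.count tallies of the four command characters (simpler).


-- ===== PORT A =====
-- literal transliteration: fold over the characters, four independent if-updates per char
def solution (n : Int) (control : String) : Int :=
  control.toList.foldl
    (fun result i =>
      let result := if i = 'w' then result + 1 else result
      let result := if i = 's' then result - 1 else result
      let result := if i = 'd' then result + 10 else result
      let result := if i = 'a' then result - 10 else result
      result) n

-- ===== PORT B =====
-- literal transliteration of Source B: closed-form expression over str.count tallies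
def solution_alt (n : Int) (control : String) : Int :=
  n + (PySem.Str.count control "w" : Int) - (PySem.Str.count control "s" : Int)
    + 10 * ((PySem.Str.count control "d" : Int) - (PySem.Str.count control "a" : Int))

-- ===== PRECONDITION & SPEC =====
def Spec_solution (n : Int) (control : String) (out : Int) : Prop := out = solution_alt n control
instance (n : Int) (control : String) (out : Int) : Decidable (Spec_solution n control out) := by unfold Spec_solution; infer_instance

-- ===== CLAIM (what is proved, stated in full; the proofs are below) =====
def Claim_equal_solution : Prop := ∀ (n : Int) (control : String), Dom_solution n control → Spec_solution n control (solution n control)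

-- ===== LEMMAS AND PROOFS =====

-- Python's substring count with a single-character needle is List.count
theorem chars_count_go_single (c : Char) :
    ∀ (fuel : Nat) (l : List Char) (acc : Nat), l.length ≤ fuel →
      PySem.Chars.count.go [c] fuel l acc = acc + l.count c := by
  intro fuel
  induction fuel with
  | zero =>
    intro l acc h
    cases l with
    | nil => simp [PySem.Chars.count.go]
    | cons x t => simp at h
  | succ f ih =>
    intro l acc h
    cases l with
    | nil => simp [PySem.Chars.count.go]
    | cons x t =>
      simp only [List.length_cons, Nat.succ_le_succ_iff] at h
      by_cases hx : x = c
      · subst hx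
        have hpre : List.isPrefixOf [x] (x :: t) = true := by
          simp [List.isPrefixOf]
        rw [PySem.Chars.count.go]
        simp only [hpre, if_pos]
        simp only [List.length_cons, List.length_nil]
        rw [List.drop_one, List.tail_cons]
        rw [ih t (acc + 1) h]
        simp
        omega
      · have hpre : List.isPrefixOf [c] (x :: t) = false := by
          simp [List.isPrefixOf]
          exact fun hh => (hx hh.symm).elim
        rw [PySem.Chars.count.go]
        simp only [hpre]
        rw [if_neg (by simp)]
        rw [ih t acc h]
        simp [hx]

theorem chars_count_single (l : List Char) (c : Char) :
    PySem.Chars.count l [c] = l.count c := by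
  rw [PySem.Chars.count]
  simp only [List.isEmpty_cons, Bool.false_eq_true, if_false]
  rw [chars_count_go_single c l.length l 0 (le_refl _)]
  simp

theorem foldl_step (l : List Char) : ∀ (n : Int),
    l.foldl
      (fun result i =>
        let result := if i = 'w' then result + 1 else result
        let result := if i = 's' then result - 1 else result
        let result := if i = 'd' then result + 10 else result
        let result := if i = 'a' then result - 10 else result
        result) n
    = n + (l.count 'w' : Int) - (l.count 's' : Int)
        + 10 * ((l.count 'd' : Int) - (l.count 'a' : Int)) := by
  induction l with
  | nil => intro n; simp
  | cons x t ih =>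
    intro n
    simp only [List.foldl_cons, ih, List.count_cons]
    by_cases h1 : x = 'w' <;> by_cases h2 : x = 's' <;> by_cases h3 : x = 'd' <;>
      by_cases h4 : x = 'a' <;>
      simp [h1, h2, h3, h4] at * <;> ring_nf

-- ===== VERDICT (by name: the statement is the Claim_ definition above) =====
theorem solution_spec : Claim_equal_solution := by
  intro n control _
  show solution n control = solution_alt n control
  unfold solution solution_alt
  rw [foldl_step]
  have hw : ("w" : String).toList = ['w'] := rfl
  have hs : ("s" : String).toList = ['s'] := rfl
  have hd : ("d" : String).toList = ['d'] := rfl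
  have ha : ("a" : String).toList = ['a'] := rfl
  rw [PySem.Str.count_eq, PySem.Str.count_eq, PySem.Str.count_eq, PySem.Str.count_eq,
      hw, hs, hd, ha,
      chars_count_single, chars_count_single, chars_count_single, chars_count_single]
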